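-- pv_equiv track=rewrite | github.com/deadsy/pycs | wip/cli/cli.py | split_index
-- ===== SOURCE A (Python) =====
-- def split_index(s):
--   """split a string on whitespace and return the substring indices"""
--   # start and end with whitespace
--   ws = True
--   s += ' '
--   start = []
--   end = []
--   for (i, c) in enumerate(s):
--     if not ws and c == ' ':
--       # non-whitespace to whitespace
--       end.append(i)
--       ws = True
--     elif ws and c != ' ':
--       # whitespace to non-whitespace
--       start.append(i)
--       ws = False
--   return zip(start, end)
-- ===== SOURCE B (Python) =====
-- def split_index(s):
--   """split a string on whitespace and return the substring indices"""
--   # two-pointer scan: skip spaces, then jump to the end of each token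
--   start = []
--   end = []
--   n = len(s)
--   i = 0
--   while i < n:
--     if s[i] == ' ':
--       i += 1
--     else:
--       j = i + 1
--       while j < n and s[j] != ' ':
--         j += 1
--       start.append(i)
--       end.append(j)
--       i = j
--   return zip(start, end)
-- ===== Notes on version B (the rewrite author's own statement) =====
-- stated objective: alternative
-- what changed: Replaces the per-character whitespace state machine (with an appended sentinel space) by a two-pointer scan that skips spaces and jumps over each maximal run of non-space characters, recording its start and end directly.
import Mathlib
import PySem

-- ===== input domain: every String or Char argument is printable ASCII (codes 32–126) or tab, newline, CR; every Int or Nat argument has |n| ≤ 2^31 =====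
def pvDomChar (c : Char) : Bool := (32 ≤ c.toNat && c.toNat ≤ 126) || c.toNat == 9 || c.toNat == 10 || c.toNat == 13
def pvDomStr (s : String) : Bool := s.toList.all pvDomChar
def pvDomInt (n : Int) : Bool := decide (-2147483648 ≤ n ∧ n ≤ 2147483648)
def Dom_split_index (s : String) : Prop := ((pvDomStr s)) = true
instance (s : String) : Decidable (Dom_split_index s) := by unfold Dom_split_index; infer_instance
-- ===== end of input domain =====

-- B replaces A's per-character whitespace state machine (with appended sentinel space) by a
-- two-pointer scan that skips spaces and jumps over each maximal non-space run (objective: alternative).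

-- ===== PORT A =====
-- one loop step of A: state (ws, start, end), input (i, c)
def pvStepA (st : Bool × List Int × List Int) (p : Int × Char) : Bool × List Int × List Int :=
  if !st.1 && p.2 == ' ' then (true, st.2.1, st.2.2 ++ [p.1])
  else if st.1 && p.2 != ' ' then (false, st.2.1 ++ [p.1], st.2.2)
  else st

def split_index (s : String) : List (Int × Int) :=
  let s2 := s.toList ++ [' ']          -- s += ' '
  let r := (PySem.List.enumerate s2).foldl pvStepA (true, [], [])
  r.2.1.zip r.2.2                      -- zip(start, end)

-- ===== PORT B =====
-- Source B's outer while loop: skip a space, or emit the token [i, j) and resume at j.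
def pvScanB : List Char → Int → List Int × List Int
  | [], _ => ([], [])
  | c :: cs, i =>
    if c = ' ' then pvScanB cs (i + 1)
    else
      let t := cs.takeWhile (· ≠ ' ')   -- the inner while: advance j past non-spaces
      let j := i + 1 + (t.length : Int)
      let r := pvScanB (cs.drop t.length) j
      (i :: r.1, j :: r.2)
  termination_by cs => cs.length
  decreasing_by all_goals
    (have := (List.takeWhile_sublist (p := fun x => decide (x ≠ ' ')) (l := cs)).length_le
     simp only [List.length_drop, List.length_cons]; omega)

def split_index_alt (s : String) : List (Int × Int) :=
  let r := pvScanB s.toList 0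
  r.1.zip r.2                          -- zip(start, end)

-- ===== PRECONDITION & SPEC =====
def Spec_split_index (s : String) (out : List (Int × Int)) : Prop := out = split_index_alt s
instance (s : String) (out : List (Int × Int)) : Decidable (Spec_split_index s out) := by unfold Spec_split_index; infer_instance

-- ===== CLAIM (what is proved, stated in full; the proofs are below) =====
def Claim_equal_split_index : Prop := ∀ (s : String), Dom_split_index s → Spec_split_index s (split_index s)

-- ===== LEMMAS AND PROOFS =====

-- proof helper: A's state machine while inside a token that started earlier; position i
def pvScanC : List Char → Int → List Int × List Int
  | [], i => ([], [i])
  | c :: cs, i =>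
    if c = ' ' then
      let r := pvScanB cs (i + 1)
      (r.1, i :: r.2)
    else pvScanC cs (i + 1)

theorem pvScanC_spec (cs : List Char) : ∀ i : Int,
    pvScanC cs i =
      ((pvScanB (cs.drop (cs.takeWhile (· ≠ ' ')).length)
          (i + ((cs.takeWhile (· ≠ ' ')).length : Int))).1,
       (i + ((cs.takeWhile (· ≠ ' ')).length : Int)) ::
        (pvScanB (cs.drop (cs.takeWhile (· ≠ ' ')).length)
          (i + ((cs.takeWhile (· ≠ ' ')).length : Int))).2) := by
  induction cs with
  | nil => intro i; simp [pvScanC, pvScanB]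
  | cons c cs ih =>
    intro i
    by_cases h : c = ' '
    · subst h
      simp [pvScanC, pvScanB, List.takeWhile]
    · have e : ∀ n : Nat, i + 1 + (n : Int) = i + ((n : Int) + 1) := fun n => by ring
      simp [pvScanC, List.takeWhile, h, ih (i + 1), e]

theorem pvScanB_cons {c : Char} (h : c ≠ ' ') (cs : List Char) (i : Int) :
    pvScanB (c :: cs) i = (i :: (pvScanC cs (i + 1)).1, (pvScanC cs (i + 1)).2) := by
  rw [pvScanC_spec]
  simp [pvScanB, h]

theorem pvMain (cs : List Char) :
    (∀ (i : Int) (S E : List Int),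
        (PySem.List.enumerate (cs ++ [' ']) i).foldl pvStepA (true, S, E)
          = (true, S ++ (pvScanB cs i).1, E ++ (pvScanB cs i).2)) ∧
    (∀ (i : Int) (S E : List Int),
        (PySem.List.enumerate (cs ++ [' ']) i).foldl pvStepA (false, S, E)
          = (true, S ++ (pvScanC cs i).1, E ++ (pvScanC cs i).2)) := by
  induction cs with
  | nil =>
    constructor <;> intro i S E <;>
      simp [PySem.List.enumerate_cons, PySem.List.enumerate_nil, pvStepA, pvScanB, pvScanC]
  | cons c cs ih =>
    obtain ⟨ih1, ih2⟩ := ih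
    constructor <;> intro i S E
    · by_cases h : c = ' '
      · subst h
        simp [PySem.List.enumerate_cons, pvStepA, pvScanB, ih1 (i + 1)]
      · rw [pvScanB_cons h]
        simp [PySem.List.enumerate_cons, pvStepA, h, ih2 (i + 1)]
    · by_cases h : c = ' '
      · subst h
        simp [PySem.List.enumerate_cons, pvStepA, pvScanC, ih1 (i + 1)]
      · simp [PySem.List.enumerate_cons, pvStepA, h, pvScanC, ih2 (i + 1)]

-- ===== VERDICT (by name: the statement is the Claim_ definition above) =====
theorem split_index_spec : Claim_equal_split_index := by
  intro s _
  unfold Spec_split_index split_index split_index_alt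
  simp [(pvMain s.toList).1 0 [] []]
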